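-- pv_equiv track=rewrite | github.com/NilsFo/Advent-of-Code | 2024/Day23/day23.py | hop_host
-- ===== SOURCE A (Python) =====
-- def hop_host(initial_host: str,
--              hops_remaining: int,
--              host_dict: dict,
--              hosts_history: [str],
--              current_host: str) -> [str]:
--     # adding myself to the history
--     hosts_history = hosts_history.copy()
--     hosts_history.append(current_host)
--     hops_remaining -= 1
--
--     #
--     loop_hosts = []
--
--     # checking all connected hosts
--     other_hosts = host_dict[current_host]
--
--     for other_host in other_hosts:
--         if hops_remaining == 0:
--             # check if we made a round trip
--             if other_host == initial_host:
--                 loop_hosts.append(hosts_history)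
--             # else:
--             #    return []
--         else:
--             # not retracing our path
--             if other_host not in hosts_history:
--                 loop_history = hop_host(
--                     initial_host=initial_host,
--                     hops_remaining=hops_remaining,
--                     host_dict=host_dict,
--                     hosts_history=hosts_history,
--                     current_host=other_host
--                 )
--                 if len(loop_history) > 0:
--                     for l in loop_history:
--                         loop_hosts.append(l)
--
--     # done?
--     return loop_hosts
-- ===== SOURCE B (Python) =====
-- def hop_host(initial_host: str,
--              hops_remaining: int,
--              host_dict: dict,
--              hosts_history: [str],
--              current_host: str) -> [str]:
--     # Iterative breadth-first level expansion instead of recursive DFS.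
--     frontier = [(current_host, hosts_history + [current_host])]
--     hops = hops_remaining - 1
--     while hops != 0 and frontier:
--         frontier = [(oh, h + [oh])
--                     for c, h in frontier
--                     for oh in host_dict[c]
--                     if oh not in h]
--         hops -= 1
--     if hops != 0:
--         # ran out of extendable paths before using up the hops
--         return []
--     return [h for c, h in frontier for oh in host_dict[c] if oh == initial_host]
-- ===== Notes on version B (the rewrite author's own statement) =====
-- stated objective: alternative
-- what changed: Replaced the recursive DFS with an iterative breadth-first level expansion: a frontier of (host, path) states is expanded once per hop (stopping early if no path can be extended), and closing edges back to the initial host are emitted in one final pass; recursion and per-call result concatenation disappear.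
import Mathlib
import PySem

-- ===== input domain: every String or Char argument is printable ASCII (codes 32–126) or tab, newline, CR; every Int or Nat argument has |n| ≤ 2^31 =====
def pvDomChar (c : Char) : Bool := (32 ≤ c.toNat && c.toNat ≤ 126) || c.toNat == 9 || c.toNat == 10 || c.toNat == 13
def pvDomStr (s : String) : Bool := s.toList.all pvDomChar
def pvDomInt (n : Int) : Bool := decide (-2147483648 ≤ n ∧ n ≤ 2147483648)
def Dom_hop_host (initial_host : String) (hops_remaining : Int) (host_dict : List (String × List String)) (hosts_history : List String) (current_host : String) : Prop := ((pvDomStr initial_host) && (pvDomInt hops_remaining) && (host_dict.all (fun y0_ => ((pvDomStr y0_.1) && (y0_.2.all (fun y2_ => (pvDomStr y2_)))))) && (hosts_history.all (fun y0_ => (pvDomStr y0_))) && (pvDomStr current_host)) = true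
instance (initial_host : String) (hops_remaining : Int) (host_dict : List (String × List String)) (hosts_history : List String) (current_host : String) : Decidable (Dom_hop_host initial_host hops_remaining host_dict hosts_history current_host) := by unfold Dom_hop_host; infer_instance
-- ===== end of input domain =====

-- B replaces A's recursive DFS by an iterative per-level frontier expansion (same results, same order; not faster).


-- ===== PORT A =====
-- Python's host_dict[k] on an association list (first match); on a missing key Python raises
-- KeyError — those inputs are excluded by Pre_hop_host, here the lookup defaults to [].
def dGet (host_dict : List (String × List String)) (k : String) : List String :=
  ((host_dict.find? (fun p => p.1 == k)).map (·.2)).getD []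

-- Literal transliteration of A's recursive DFS; fuel only makes the recursion total:
-- the recursion depth is bounded by hops_remaining when it is positive, and by the number of
-- neighbour entries of host_dict otherwise (each recursive step visits an unvisited neighbour).
def hopA (fuel : Nat) (initial_host : String) (hops_remaining : Int) (host_dict : List (String × List String)) (hosts_history : List String) (current_host : String) : List (List String) :=
  match fuel with
  | 0 => []
  | f + 1 =>
    let hist := hosts_history ++ [current_host]
    let hops := hops_remaining - 1
    let others := dGet host_dict current_host
    others.foldl (fun acc oh =>
      if hops == 0 then (if oh == initial_host then acc ++ [hist] else acc)
      else if hist.contains oh then acc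
      else acc ++ hopA f initial_host hops host_dict hist oh) []

def hop_host (initial_host : String) (hops_remaining : Int) (host_dict : List (String × List String)) (hosts_history : List String) (current_host : String) : List (List String) :=
  hopA (hops_remaining.toNat + host_dict.foldl (fun n p => n + p.2.length) 0 + 2)
    initial_host hops_remaining host_dict hosts_history current_host

-- ===== PORT B =====
-- one frontier-expansion step: the comprehension of Source B's loop body
def levelStep (host_dict : List (String × List String)) (fr : List (String × List String)) : List (String × List String) :=
  fr.flatMap (fun p => ((dGet host_dict p.1).filter (fun oh => !(p.2.contains oh))).map (fun oh => (oh, p.2 ++ [oh])))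

-- Source B's final emission comprehension
def emitLevel (initial_host : String) (host_dict : List (String × List String)) (fr : List (String × List String)) : List (List String) :=
  fr.flatMap (fun p => ((dGet host_dict p.1).filter (fun oh => oh == initial_host)).map (fun _ => p.2))

-- Source B's while loop ('while hops != 0 and frontier: expand; hops -= 1'); fuel only makes the
-- loop total: the iteration count is bounded by hops when positive and, when the frontier must
-- die out first, by the number of neighbour entries of host_dict (paths never revisit a host).
def levelLoop (fuel : Nat) (host_dict : List (String × List String)) (hops : Int) (fr : List (String × List String)) : Int × List (String × List String) :=
  match fuel with
  | 0 => (hops, fr)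
  | f + 1 =>
    if hops ≠ 0 ∧ fr ≠ [] then levelLoop f host_dict (hops - 1) (levelStep host_dict fr)
    else (hops, fr)

def hop_host_alt (initial_host : String) (hops_remaining : Int) (host_dict : List (String × List String)) (hosts_history : List String) (current_host : String) : List (List String) :=
  let st := levelLoop (hops_remaining.toNat + host_dict.foldl (fun n p => n + p.2.length) 0 + 2)
    host_dict (hops_remaining - 1) [(current_host, hosts_history ++ [current_host])]
  if st.1 ≠ 0 then [] else emitLevel initial_host host_dict st.2

-- ===== PRECONDITION & SPEC =====
-- Graph-reachability condition for 'A raises KeyError': starting from cur and following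
-- host_dict edges to hosts not yet in the history, within the hop budget, some host without
-- a host_dict entry gets looked up.  It decides raising only and shares nothing with the
-- ports (no initial_host, no path collection).  The Nat bound only makes the recursion
-- structural: every step moves to a distinct key outside the history, so a violating walk
-- visits at most host_dict.length + 2 hosts and the bound in Pre_hop_host is never reached.
def reachMiss (bound : Nat) (host_dict : List (String × List String)) (hist : List String) (hops : Int) (cur : String) : Bool :=
  match bound with
  | 0 => false
  | b + 1 =>
    match host_dict.find? (fun p => p.1 == cur) with
    | none => true
    | some p =>
      if hops - 1 == 0 then false
      else p.2.any (fun o =>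
        !((hist ++ [cur]).contains o) && reachMiss b host_dict (hist ++ [cur]) (hops - 1) o)

-- Pre_ excludes exactly the inputs on which A raises KeyError (a host with no host_dict
-- entry is reachable within the hop budget without retracing the history); it admits every
-- input on which A returns.
def Pre_hop_host (initial_host : String) (hops_remaining : Int) (host_dict : List (String × List String)) (hosts_history : List String) (current_host : String) : Prop :=
  reachMiss (host_dict.length + 2) host_dict hosts_history hops_remaining current_host = false
instance (initial_host : String) (hops_remaining : Int) (host_dict : List (String × List String)) (hosts_history : List String) (current_host : String) : Decidable (Pre_hop_host initial_host hops_remaining host_dict hosts_history current_host) := by unfold Pre_hop_host; infer_instance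

def pvWitness_hop_host : String × Int × (List (String × List String)) × List String × String :=
  ("a", 2, [("a", ["b"]), ("b", ["a"])], [], "a")

def Spec_hop_host (initial_host : String) (hops_remaining : Int) (host_dict : List (String × List String)) (hosts_history : List String) (current_host : String) (out : List (List String)) : Prop := out = hop_host_alt initial_host hops_remaining host_dict hosts_history current_host
instance (initial_host : String) (hops_remaining : Int) (host_dict : List (String × List String)) (hosts_history : List String) (current_host : String) (out : List (List String)) : Decidable (Spec_hop_host initial_host hops_remaining host_dict hosts_history current_host out) := by unfold Spec_hop_host; infer_instance

-- ===== CLAIM (what is proved, stated in full; the proofs are below) =====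
def Claim_equal_hop_host : Prop := ∀ (initial_host : String) (hops_remaining : Int) (host_dict : List (String × List String)) (hosts_history : List String) (current_host : String), Dom_hop_host initial_host hops_remaining host_dict hosts_history current_host → Pre_hop_host initial_host hops_remaining host_dict hosts_history current_host → Spec_hop_host initial_host hops_remaining host_dict hosts_history current_host (hop_host initial_host hops_remaining host_dict hosts_history current_host)

-- ===== LEMMAS AND PROOFS =====

lemma foldl_id {a b : Type} (step : b -> a -> b) (h : forall ac o, step ac o = ac) :
    forall (l : List a) (acc : b), l.foldl step acc = acc := by
  intro l
  induction l with
  | nil => intro acc; rfl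
  | cons x xs ih => intro acc; rw [List.foldl_cons, h]; exact ih acc

-- A with non-positive hops_remaining never emits (hops_remaining - 1 never reaches 0).
lemma hopA_nonpos (init : String) (d : List (String × List String)) :
    ∀ fuel hops hist cur, hops ≤ (0 : Int) →
      hopA fuel init hops d hist cur = [] := by
  intro fuel
  induction fuel with
  | zero => intro _ _ _ _; rfl
  | succ f ih =>
    intro hops hist cur hle
    show (dGet d cur).foldl _ [] = []
    have hne : ((hops - 1 : Int) == 0) = false := by
      simp only [beq_eq_false_iff_ne]; omega
    apply foldl_id
    intro a oh
    simp only [hne, Bool.false_eq_true, if_false]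
    rw [ih (hops - 1) (hist ++ [cur]) oh (by omega)]
    by_cases hc : (hist ++ [cur]).contains oh = true
    · rw [if_pos hc]
    · rw [if_neg hc, List.append_nil]

lemma flatMap_if_nil {α β : Type} (c : α → Bool) (g : α → List β) (l : List α) :
    l.flatMap (fun x => if c x then [] else g x)
      = (l.filter (fun x => !(c x))).flatMap g := by
  induction l with
  | nil => rfl
  | cons x xs ih =>
    by_cases hx : c x = true <;>
      simp [List.flatMap_cons, hx, ih]

lemma levelStep_append (d : List (String × List String)) (a b : List (String × List String)) :
    levelStep d (a ++ b) = levelStep d a ++ levelStep d b := by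
  simp [levelStep]

lemma emitLevel_append (init : String) (d : List (String × List String)) (a b : List (String × List String)) :
    emitLevel init d (a ++ b) = emitLevel init d a ++ emitLevel init d b := by
  simp [emitLevel]

lemma levelStep_iterate_append (d : List (String × List String)) :
    ∀ (n : Nat) (a b : List (String × List String)),
      (levelStep d)^[n] (a ++ b) = (levelStep d)^[n] a ++ (levelStep d)^[n] b := by
  intro n
  induction n with
  | zero => intro a b; rfl
  | succ m ih =>
    intro a b
    simp only [Function.iterate_succ_apply, levelStep_append, ih]

lemma emit_iterate_flatMap (init : String) (d : List (String × List String)) (n : Nat) :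
    ∀ (fr : List (String × List String)),
      emitLevel init d ((levelStep d)^[n] fr)
        = fr.flatMap (fun p => emitLevel init d ((levelStep d)^[n] [p])) := by
  intro fr
  induction fr with
  | nil =>
    have h0 : (levelStep d)^[n] ([] : List (String × List String)) = [] := by
      induction n with
      | zero => rfl
      | succ m ihm => simp [Function.iterate_succ_apply, levelStep, ihm]
    simp [h0, emitLevel]
  | cons p rest ih =>
    have : (p :: rest) = [p] ++ rest := rfl
    rw [this, levelStep_iterate_append, emitLevel_append, ih]
    simp

-- main correspondence: A's recursion at positive hops equals B's level expansion
lemma hopA_pos (init : String) (d : List (String × List String)) :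
    ∀ fuel (hops : Int), 1 ≤ hops → hops.toNat ≤ fuel → ∀ hist cur,
      hopA fuel init hops d hist cur
        = emitLevel init d ((levelStep d)^[(hops - 1).toNat] [(cur, hist ++ [cur])]) := by
  intro fuel
  induction fuel with
  | zero => intro hops h1 hf _ _; omega
  | succ f ih =>
    intro hops h1 hf hist cur
    show (dGet d cur).foldl _ [] = _
    by_cases hone : hops = 1
    · subst hone
      have : ((1 - 1 : Int) == 0) = true := by decide
      simp only [this, if_true]
      rw [PySem.List.foldl_append_if (fun oh => oh == init) (fun _ => hist ++ [cur])]
      simp [emitLevel, List.flatMap]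
    · have h2 : (2 : Int) ≤ hops := by omega
      have hne : ((hops - 1 : Int) == 0) = false := by
        simp only [beq_eq_false_iff_ne]; omega
      simp only [hne, Bool.false_eq_true, if_false]
      have hfe : ∀ (acc : List (List String)),
          (fun acc oh =>
            if (hist ++ [cur]).contains oh then acc
            else acc ++ hopA f init (hops - 1) d (hist ++ [cur]) oh)
          = (fun acc oh => acc ++
              (if (hist ++ [cur]).contains oh then []
               else hopA f init (hops - 1) d (hist ++ [cur]) oh)) := by
        intro _
        funext acc oh
        by_cases hc : (hist ++ [cur]).contains oh = true
        · rw [if_pos hc, if_pos hc, List.append_nil]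
        · rw [if_neg hc, if_neg hc]
      rw [hfe []]
      rw [PySem.List.foldl_append_eq_flatMap]
      rw [flatMap_if_nil]
      have hrec : ∀ oh,
          hopA f init (hops - 1) d (hist ++ [cur]) oh
            = emitLevel init d ((levelStep d)^[(hops - 2).toNat] [(oh, (hist ++ [cur]) ++ [oh])]) := by
        intro oh
        have := ih (hops - 1) (by omega) (by omega) (hist ++ [cur]) oh
        rwa [show hops - 1 - 1 = hops - 2 by ring] at this
      have hn : (hops - 1).toNat = (hops - 2).toNat + 1 := by omega
      rw [hn, Function.iterate_succ_apply]
      have hstep : levelStep d [(cur, hist ++ [cur])]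
          = ((dGet d cur).filter (fun oh => !((hist ++ [cur]).contains oh))).map
              (fun oh => (oh, (hist ++ [cur]) ++ [oh])) := by
        simp [levelStep]
      rw [hstep, emit_iterate_flatMap, List.flatMap_map]
      simp only [List.nil_append]
      congr 1
      funext oh
      exact hrec oh

lemma levelStep_iterate_nil (d : List (String × List String)) :
    ∀ n : Nat, (levelStep d)^[n] ([] : List (String × List String)) = [] := by
  intro n
  induction n with
  | zero => rfl
  | succ m ihm => simp [Function.iterate_succ_apply, levelStep, ihm]

lemma levelLoop_neg (d : List (String × List String)) :
    ∀ fuel (k : Int) fr, k < 0 → (levelLoop fuel d k fr).1 < 0 := by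
  intro fuel
  induction fuel with
  | zero => intro k fr hk; exact hk
  | succ f ih =>
    intro k fr hk
    simp only [levelLoop]
    by_cases hc : k ≠ 0 ∧ fr ≠ []
    · rw [if_pos hc]; exact ih (k - 1) (levelStep d fr) (by omega)
    · rw [if_neg hc]; exact hk

lemma levelLoop_nonneg (init : String) (d : List (String × List String)) :
    ∀ fuel (k : Int), 0 ≤ k → k.toNat ≤ fuel → ∀ fr,
      (if (levelLoop fuel d k fr).1 ≠ 0 then []
       else emitLevel init d (levelLoop fuel d k fr).2)
        = emitLevel init d ((levelStep d)^[k.toNat] fr) := by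
  intro fuel
  induction fuel with
  | zero =>
    intro k hk hf fr
    have hk0 : k = 0 := by omega
    subst hk0
    simp [levelLoop]
  | succ f ih =>
    intro k hk hf fr
    by_cases hk0 : k = 0
    · subst hk0
      have hc : ¬((0 : Int) ≠ 0 ∧ fr ≠ []) := by simp
      simp only [levelLoop]
      rw [if_neg hc]
      simp
    · by_cases hfr : fr = []
      · subst hfr
        have hc : ¬((k : Int) ≠ 0 ∧ ([] : List (String × List String)) ≠ []) := by simp
        simp only [levelLoop]
        rw [if_neg hc]
        rw [if_pos (by exact hk0)]
        rw [levelStep_iterate_nil]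
        rfl
      · have hc : (k : Int) ≠ 0 ∧ fr ≠ [] := ⟨hk0, hfr⟩
        simp only [levelLoop]
        rw [if_pos hc]
        have hkn : k.toNat = (k - 1).toNat + 1 := by omega
        rw [ih (k - 1) (by omega) (by omega) (levelStep d fr), hkn,
          Function.iterate_succ_apply]

-- ===== VERDICT (by name: the statement is the Claim_ definition above) =====
theorem hop_host_spec : Claim_equal_hop_host := by
  intro init hops d hist cur _ _
  unfold Spec_hop_host hop_host hop_host_alt
  by_cases hle : hops ≤ 0
  · rw [hopA_nonpos init d _ hops hist cur hle]
    rw [if_pos (by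
      have := levelLoop_neg d (hops.toNat + d.foldl (fun n p => n + p.2.length) 0 + 2)
        (hops - 1) [(cur, hist ++ [cur])] (by omega)
      omega)]
  · rw [levelLoop_nonneg init d _ (hops - 1) (by omega) (by omega) [(cur, hist ++ [cur])]]
    exact hopA_pos init d _ hops (by omega) (by omega) hist cur
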